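-- pv_equiv track=rewrite | github.com/Qian8625/WeaveLight | tool_server/tool_workers/online_workers/SmallObjectDetection_worker.py | _generate_tile_windows
-- ===== SOURCE A (Python) =====
-- from typing import Any, Dict, List, Optional, Sequence, Tuple
--
-- def _generate_tile_windows(
--
--     width: int,
--     height: int,
--     tile_size: int,
--     tile_overlap: int,
-- ) -> List[Tuple[int, int, int, int]]:
--     if tile_size <= 0:
--         raise ValueError("tile_size must be positive")
--     if tile_overlap < 0:
--         raise ValueError("tile_overlap must be >= 0")
--     if tile_overlap >= tile_size:
--         raise ValueError("tile_overlap must be smaller than tile_size")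
--
--     if width <= tile_size and height <= tile_size:
--         return [(0, 0, width, height)]
--
--     stride = tile_size - tile_overlap
--
--     def compute_starts(length: int) -> List[int]:
--         if length <= tile_size:
--             return [0]
--         starts = list(range(0, max(length - tile_size, 0) + 1, stride))
--         last_start = max(length - tile_size, 0)
--         if starts[-1] != last_start:
--             starts.append(last_start)
--         return starts
--
--     x_starts = compute_starts(width)
--     y_starts = compute_starts(height)
--     return [
--         (x0, y0, min(x0 + tile_size, width), min(y0 + tile_size, height))
--         for y0 in y_starts
--         for x0 in x_starts
--     ]
-- ===== SOURCE B (Python) =====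
-- from typing import List, Tuple
--
-- def _generate_tile_windows(
--     width: int,
--     height: int,
--     tile_size: int,
--     tile_overlap: int,
-- ) -> List[Tuple[int, int, int, int]]:
--     if tile_size <= 0:
--         raise ValueError("tile_size must be positive")
--     if tile_overlap < 0:
--         raise ValueError("tile_overlap must be >= 0")
--     if tile_overlap >= tile_size:
--         raise ValueError("tile_overlap must be smaller than tile_size")
--
--     if width <= tile_size and height <= tile_size:
--         return [(0, 0, width, height)]
--
--     stride = tile_size - tile_overlap
--
--     # Single pass with an (x, y) cursor: emit each window directly and advance
--     # the cursor by the stride, clamping it to the last valid start position.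
--     # No per-dimension start lists are ever materialised.
--     windows: List[Tuple[int, int, int, int]] = []
--     y = 0
--     while True:
--         x = 0
--         while True:
--             windows.append((x, y, min(x + tile_size, width), min(y + tile_size, height)))
--             if x + tile_size >= width:
--                 break
--             x = min(x + stride, width - tile_size)
--         if y + tile_size >= height:
--             break
--         y = min(y + stride, height - tile_size)
--     return windows
-- ===== Notes on version B (the rewrite author's own statement) =====
-- stated objective: alternative
-- what changed: B replaces A's per-dimension materialised start lists (range of strides plus a conditional append of the clamped final start, then a cross-product comprehension) with a single pass of nested cursor loops: an (x, y) cursor emits each window directly and advances by min(pos + stride, length - tile_size), so no start list exists and no tail fix-up is needed.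
import Mathlib
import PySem

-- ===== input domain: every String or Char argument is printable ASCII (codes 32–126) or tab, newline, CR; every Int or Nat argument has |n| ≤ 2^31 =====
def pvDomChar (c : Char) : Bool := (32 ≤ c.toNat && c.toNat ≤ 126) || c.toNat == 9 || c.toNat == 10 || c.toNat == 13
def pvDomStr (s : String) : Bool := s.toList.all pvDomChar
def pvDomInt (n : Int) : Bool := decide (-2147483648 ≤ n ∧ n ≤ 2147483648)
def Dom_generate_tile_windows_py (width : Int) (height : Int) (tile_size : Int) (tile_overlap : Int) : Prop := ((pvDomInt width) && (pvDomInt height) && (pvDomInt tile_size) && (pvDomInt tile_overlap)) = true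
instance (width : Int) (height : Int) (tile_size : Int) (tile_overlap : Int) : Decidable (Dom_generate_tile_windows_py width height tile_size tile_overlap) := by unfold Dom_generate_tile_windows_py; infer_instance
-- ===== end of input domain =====

-- B emits windows in one pass of nested cursor loops (advance clamped by
-- min(pos+stride, length-tile_size)) instead of A's materialised start lists
-- with a conditional tail append (objective: alternative, same cost).


-- ===== PORT A =====
-- compute_starts of A; starts[-1] is PySem.List.pyGet? starts (-1) (none = IndexError,
-- unreachable here since the range is nonempty whenever stride > 0)
def pvComputeStartsA (tile_size : Int) (stride : Int) (length : Int) : List Int :=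
  if length ≤ tile_size then [0]
  else
    let starts := PySem.List.pyRange 0 (max (length - tile_size) 0 + 1) stride
    let last_start := max (length - tile_size) 0
    if PySem.List.pyGet? starts (-1) ≠ some last_start then starts ++ [last_start] else starts

-- the three ValueError branches return [] here; they are excluded by Pre_
def generate_tile_windows_py (width : Int) (height : Int) (tile_size : Int) (tile_overlap : Int) : List (Int × Int × Int × Int) :=
  if tile_size ≤ 0 then []
  else if tile_overlap < 0 then []
  else if tile_size ≤ tile_overlap then []
  else if width ≤ tile_size ∧ height ≤ tile_size then [(0, 0, width, height)]
  else
    let stride := tile_size - tile_overlap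
    let x_starts := pvComputeStartsA tile_size stride width
    let y_starts := pvComputeStartsA tile_size stride height
    y_starts.flatMap (fun y0 => x_starts.map (fun x0 =>
      (x0, y0, min (x0 + tile_size) width, min (y0 + tile_size) height)))

-- ===== PORT B =====
-- Source B's inner while loop: emit the window at cursor x, stop when the tile
-- reaches the right edge, else advance the cursor by the clamped stride.
-- The final 'else [...]' branch is a totality guard only (needs stride ≤ 0).
def pvWalkX (tile_size : Int) (stride : Int) (width : Int) (y : Int) (height : Int) (x : Int) : List (Int × Int × Int × Int) :=
  let w := (x, y, min (x + tile_size) width, min (y + tile_size) height)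
  if width ≤ x + tile_size then [w]
  else if h : x < min (x + stride) (width - tile_size) then
    w :: pvWalkX tile_size stride width y height (min (x + stride) (width - tile_size))
  else [w]
termination_by (width - tile_size - x).toNat
decreasing_by
  have h2 := min_le_right (x + stride) (width - tile_size)
  omega

-- Source B's outer while loop over the y cursor
def pvWalkY (tile_size : Int) (stride : Int) (width : Int) (height : Int) (y : Int) : List (Int × Int × Int × Int) :=
  let row := pvWalkX tile_size stride width y height 0
  if height ≤ y + tile_size then row
  else if h : y < min (y + stride) (height - tile_size) then
    row ++ pvWalkY tile_size stride width height (min (y + stride) (height - tile_size))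
  else row
termination_by (height - tile_size - y).toNat
decreasing_by
  have h2 := min_le_right (y + stride) (height - tile_size)
  omega

-- the three ValueError branches return [] here; they are excluded by Pre_
def generate_tile_windows_py_alt (width : Int) (height : Int) (tile_size : Int) (tile_overlap : Int) : List (Int × Int × Int × Int) :=
  if tile_size ≤ 0 then []
  else if tile_overlap < 0 then []
  else if tile_size ≤ tile_overlap then []
  else if width ≤ tile_size ∧ height ≤ tile_size then [(0, 0, width, height)]
  else
    let stride := tile_size - tile_overlap
    pvWalkY tile_size stride width height 0

-- ===== PRECONDITION & SPEC =====
-- Pre_ excludes exactly the inputs on which A raises ValueError (the three validation checks).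
def Pre_generate_tile_windows_py (width : Int) (height : Int) (tile_size : Int) (tile_overlap : Int) : Prop :=
  0 < tile_size ∧ 0 ≤ tile_overlap ∧ tile_overlap < tile_size
instance (width : Int) (height : Int) (tile_size : Int) (tile_overlap : Int) : Decidable (Pre_generate_tile_windows_py width height tile_size tile_overlap) := by unfold Pre_generate_tile_windows_py; infer_instance

def pvWitness_generate_tile_windows_py : Int × Int × Int × Int := (10, 7, 4, 1)

def Spec_generate_tile_windows_py (width : Int) (height : Int) (tile_size : Int) (tile_overlap : Int) (out : List (Int × Int × Int × Int)) : Prop := out = generate_tile_windows_py_alt width height tile_size tile_overlap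
instance (width : Int) (height : Int) (tile_size : Int) (tile_overlap : Int) (out : List (Int × Int × Int × Int)) : Decidable (Spec_generate_tile_windows_py width height tile_size tile_overlap out) := by unfold Spec_generate_tile_windows_py; infer_instance

-- ===== CLAIM (what is proved, stated in full; the proofs are below) =====
def Claim_equal_generate_tile_windows_py : Prop := ∀ (width : Int) (height : Int) (tile_size : Int) (tile_overlap : Int), Dom_generate_tile_windows_py width height tile_size tile_overlap → Pre_generate_tile_windows_py width height tile_size tile_overlap → Spec_generate_tile_windows_py width height tile_size tile_overlap (generate_tile_windows_py width height tile_size tile_overlap)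

-- ===== LEMMAS AND PROOFS =====

-- proof-only abstraction of both cursor loops: the chain of visited start positions
def pvChain (st : Int) (last : Int) (x : Int) : List Int :=
  if last ≤ x then [x]
  else if h : x < min (x + st) last then x :: pvChain st last (min (x + st) last)
  else [x]
termination_by (last - x).toNat
decreasing_by
  have h2 := min_le_right (x + st) last
  omega

theorem walkX_eq_chain (ts st w y h x : Int) :
    pvWalkX ts st w y h x
      = (pvChain st (w - ts) x).map (fun x0 => (x0, y, min (x0 + ts) w, min (y + ts) h)) := by
  fun_induction pvWalkX ts st w y h x with
  | case1 x wv hle =>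
    rw [pvChain, if_pos (by omega)]
    rfl
  | case2 x wv hle hlt ih =>
    rw [pvChain, if_neg (by omega), dif_pos (by omega)]
    simp only [List.map_cons]
    rw [ih]
  | case3 x wv hle hlt =>
    rw [pvChain, if_neg (by omega), dif_neg (by omega)]
    rfl

theorem walkY_eq_chain (ts st w h y : Int) :
    pvWalkY ts st w h y
      = (pvChain st (h - ts) y).flatMap (fun y0 => pvWalkX ts st w y0 h 0) := by
  fun_induction pvWalkY ts st w h y with
  | case1 y rv hle =>
    rw [pvChain, if_pos (by omega)]
    simp only [List.flatMap_cons, List.flatMap_nil, List.append_nil]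
    rfl
  | case2 y rv hle hlt ih =>
    rw [pvChain, if_neg (by omega), dif_pos (by omega)]
    simp only [List.flatMap_cons]
    rw [ih]
  | case3 y rv hle hlt =>
    rw [pvChain, if_neg (by omega), dif_neg (by omega)]
    simp only [List.flatMap_cons, List.flatMap_nil, List.append_nil]
    rfl

-- closed description of the chain from any 0 ≤ x ≤ last when the stride is positive
theorem chain_spec (st last : Int) (hst : 0 < st) :
    ∀ x : Int, 0 ≤ x → x ≤ last →
    pvChain st last x
      = (List.range (((last - x) / st).toNat + 1)).map (fun k : Nat => x + st * k)
        ++ (if (last - x) % st = 0 then [] else [last]) := by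
  intro x hx0 hxl
  induction hn : (last - x).toNat using Nat.strong_induction_on generalizing x with
  | _ n ih =>
  by_cases hstop : last ≤ x
  · have hxe : x = last := le_antisymm hxl hstop
    subst hxe
    rw [pvChain, if_pos le_rfl]
    simp
  · rw [pvChain, if_neg hstop, dif_pos (by omega)]
    by_cases hin : x + st ≤ last
    · -- next cursor is x + st
      have hmin : min (x + st) last = x + st := min_eq_left hin
      rw [hmin]
      have hrec := ih (last - (x + st)).toNat (by omega) (x + st) (by omega) (by omega) rfl
      rw [hrec]
      have hdiv : (last - x) / st = (last - (x + st)) / st + 1 := by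
        have h1 : last - x = (last - (x + st)) + 1 * st := by ring
        rw [h1, Int.add_mul_ediv_right _ _ (by omega : st ≠ 0)]
      have hmod : (last - x) % st = (last - (x + st)) % st := by
        have h1 : last - x = (last - (x + st)) + 1 * st := by ring
        rw [h1, Int.add_mul_emod_self_right]
      rw [hdiv, hmod]
      have hcnt : ((last - (x + st)) / st + 1).toNat + 1 = (((last - (x + st)) / st).toNat + 1) + 1 := by
        have := Int.ediv_nonneg (by omega : (0:Int) ≤ last - (x + st)) (by omega : (0:Int) ≤ st)
        omega
      rw [hcnt]
      conv_rhs => rw [List.range_succ_eq_map]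
      simp only [List.map_cons, List.map_map, Nat.cast_zero, mul_zero, add_zero,
        List.cons_append]
      congr 2
      apply List.map_congr_left
      intro k _
      simp only [Function.comp_apply, Nat.cast_succ]
      ring
    · -- next cursor clamps to last
      have hmin : min (x + st) last = last := min_eq_right (by omega)
      rw [hmin, pvChain, if_pos le_rfl]
      have hdiv : (last - x) / st = 0 := Int.ediv_eq_zero_of_lt (by omega) (by omega)
      have hmod : (last - x) % st = last - x := Int.emod_eq_of_lt (by omega) (by omega)
      rw [hdiv, hmod, if_neg (by omega)]
      simp

-- A's compute_starts equals the chain from 0 (for a positive stride)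
theorem startsA_eq_chain (ts st length : Int) (hst : 0 < st) :
    pvComputeStartsA ts st length = pvChain st (length - ts) 0 := by
  unfold pvComputeStartsA
  by_cases hl : length ≤ ts
  · rw [if_pos hl, pvChain, if_pos (by omega)]
  · rw [if_neg hl]
    set L := length - ts with hLdef
    have hL1 : 0 < L := by omega
    have hmax : max L 0 = L := by omega
    set q : Int := L / st with hq
    set r : Int := L % st with hr
    have hdm : st * q + r = L := Int.mul_ediv_add_emod L st
    have hr0 : 0 ≤ r := Int.emod_nonneg L (by omega)
    have hrs : r < st := Int.emod_lt_of_pos L hst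
    have hq0 : 0 ≤ q := Int.ediv_nonneg (by omega) (by omega)
    have hdivA : (L + st) / st = q + 1 := by
      have := Int.add_mul_ediv_right L 1 (show st ≠ 0 by omega)
      simpa using this
    have hA : PySem.List.pyRange 0 (L + 1) st
        = List.map (fun k : Nat => 0 + st * (k : Int)) (List.range (q.toNat + 1)) := by
      rw [PySem.List.pyRange_of_pos 0 (L+1) hst, if_pos (by omega)]
      have h1 : ((L + 1 - 0 + st - 1) / st).toNat = q.toNat + 1 := by
        have h2 : L + 1 - 0 + st - 1 = L + st := by ring
        rw [h2, hdivA]; omega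
      rw [h1]
    have hqcast : ((q.toNat : Int)) = q := by omega
    have hlast : (List.map (fun k : Nat => 0 + st * (k : Int)) (List.range (q.toNat + 1))).getLast?
        = some (st * q) := by
      simp [List.range_succ, hqcast]
    have hchain := chain_spec st L hst 0 le_rfl (by omega)
    simp only [sub_zero] at hchain
    rw [hchain]
    simp only [hmax, hA, ← hq, ← hr, PySem.List.pyGet?_neg_one, hlast, ne_eq]
    by_cases hrz : r = 0
    · have hLq : st * q = L := by omega
      rw [if_neg (by simp [hLq]), if_pos hrz]
      simp [zero_add]
    · have hne : ¬ (some (st * q) = some L) := by simp; omega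
      rw [if_pos hne, if_neg hrz]

-- ===== VERDICT (by name: the statement is the Claim_ definition above) =====
theorem generate_tile_windows_py_spec : Claim_equal_generate_tile_windows_py := by
  intro width height tile_size tile_overlap _ hpre
  obtain ⟨h1, h2, h3⟩ := hpre
  unfold Spec_generate_tile_windows_py generate_tile_windows_py generate_tile_windows_py_alt
  have hst : ¬ tile_size ≤ 0 := by omega
  have ho : ¬ tile_overlap < 0 := by omega
  have hos : ¬ tile_size ≤ tile_overlap := by omega
  simp only [if_neg hst, if_neg ho, if_neg hos]
  split_ifs with hsmall
  · rfl
  · have hs : (0:Int) < tile_size - tile_overlap := by omega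
    rw [walkY_eq_chain]
    simp only [walkX_eq_chain]
    rw [← startsA_eq_chain tile_size _ width hs, ← startsA_eq_chain tile_size _ height hs]
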